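-- pv_equiv track=rewrite | github.com/Madhuri97/CP-Problems | 04-longestdigitrun-Python/longestdigitrun.py | longestdigitrun
-- ===== SOURCE A (Python) =====
-- def longestdigitrun(n):
-- 	# Your code goes here
-- 	if n < 0:
-- 		n = -n
-- 	l = list(map(int,str(n)))
-- 	di = {}
-- 	count = 1
-- 	for i in range(len(l) - 1):
-- 		if l[i] == l[i+1]:
-- 			count = 0
-- 			if l[i] in di:
-- 				di[l[i]] = di[l[i]] + 1
-- 			else:
-- 				di[l[i]] = 1
-- 	if count == 1:
-- 		l.sort()
-- 		return l[0]
-- 	newdi = {}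
-- 	h = sorted(di.keys())
-- 	for i in h:
-- 		newdi[i] = di[i]
-- 	newdi = sorted(newdi.items(), key = lambda item:item[1], reverse = True)
-- 	return newdi[0][0]
-- ===== SOURCE B (Python) =====
-- def longestdigitrun(n):
--     s = [int(c) for c in str(abs(n))]
--     return max(sorted(set(s)),
--                key=lambda d: sum(1 for a, b in zip(s, s[1:]) if a == b == d))
-- ===== Notes on version B (the rewrite author's own statement) =====
-- stated objective: simpler
-- what changed: Replaces the pair-counting dict, the duplicate flag with its two return branches, and the double sort of dict items by a single expression: max over the sorted distinct digits keyed by the number of adjacent equal pairs of that digit, which handles the no-duplicate case (all counts 0, max returns the smallest digit) without a separate branch.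
import Mathlib
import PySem

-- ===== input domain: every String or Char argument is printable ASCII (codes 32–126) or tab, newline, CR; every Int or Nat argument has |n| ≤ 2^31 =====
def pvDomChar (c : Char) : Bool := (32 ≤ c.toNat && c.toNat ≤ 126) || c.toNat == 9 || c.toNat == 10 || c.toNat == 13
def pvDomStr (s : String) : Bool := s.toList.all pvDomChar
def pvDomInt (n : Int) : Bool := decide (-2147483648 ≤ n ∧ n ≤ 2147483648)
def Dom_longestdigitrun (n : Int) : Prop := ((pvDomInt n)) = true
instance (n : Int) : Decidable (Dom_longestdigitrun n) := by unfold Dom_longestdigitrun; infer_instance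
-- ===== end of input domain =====

-- B replaces A's pair-counting dict, duplicate flag and double sort by one max over the
-- sorted distinct digits keyed by the adjacent-equal-pair count (objective: simpler).

-- int(c) for c a digit character of str(|n|) — exact there (digit chars are '0'..'9')
def pvDigitVal (c : Char) : Int := (c.toNat : Int) - 48

-- ===== PORT A =====
def longestdigitrun (n : Int) : Int :=
  let n' := if n < 0 then -n else n
  let l : List Int := (PySem.Int.toChars n').map pvDigitVal
  let st :=
    (PySem.List.pyRange 0 (PySem.List.len l - 1) 1).foldl
      (fun (st : PySem.Dict Int Int × Int) i =>
        if PySem.List.pyGetD l i 0 = PySem.List.pyGetD l (i + 1) 0 then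
          (if st.1.contains (PySem.List.pyGetD l i 0) then
             st.1.insert (PySem.List.pyGetD l i 0) (st.1.getD (PySem.List.pyGetD l i 0) 0 + 1)
           else st.1.insert (PySem.List.pyGetD l i 0) 1, 0)
        else st)
      (PySem.Dict.empty, 1)
  if st.2 = 1 then
    -- l.sort(); return l[0]  (l nonempty: str(n) has at least one character)
    PySem.List.pyGetD (PySem.List.sorted l (fun x => x) false) 0 0
  else
    let h := PySem.List.sorted st.1.keys (fun x => x) false
    let newdi := h.foldl (fun (nd : PySem.Dict Int Int) k => nd.insert k (st.1.getD k 0)) PySem.Dict.empty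
    let items := PySem.List.sorted newdi.items (fun p => p.2) true
    (PySem.List.pyGetD items 0 (0, 0)).1

-- ===== PORT B =====
def longestdigitrun_alt (n : Int) : Int :=
  let s : List Int := (PySem.Int.toChars |n|).map pvDigitVal
  -- max(sorted(set(s)), key=...)  (s nonempty, so the max exists; .getD 0 is never used)
  (PySem.List.max? (PySem.List.sorted (PySem.Set.ofList s) (fun x => x) false)
      (fun d => (s.zip (PySem.List.slice s (some 1) none)).foldl
        (fun acc p => if p.1 = p.2 ∧ p.2 = d then acc + 1 else acc) (0 : Int))).getD 0

-- ===== PRECONDITION & SPEC =====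
def Spec_longestdigitrun (n : Int) (out : Int) : Prop := out = longestdigitrun_alt n
instance (n : Int) (out : Int) : Decidable (Spec_longestdigitrun n out) := by unfold Spec_longestdigitrun; infer_instance

-- ===== CLAIM (what is proved, stated in full; the proofs are below) =====
def Claim_equal_longestdigitrun : Prop := ∀ (n : Int), Dom_longestdigitrun n → Spec_longestdigitrun n (longestdigitrun n)

-- ===== LEMMAS AND PROOFS =====

-- number of adjacent equal pairs of digit d in l
def pvC (l : List Int) (d : Int) : Int :=
  ((l.zip l.tail).countP (fun p => decide (p.1 = p.2 ∧ p.2 = d)) : Int)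

-- the common answer: smallest element of l among those with maximal pvC
def pvBest (l : List Int) (a : Int) : Prop :=
  a ∈ l ∧ (∀ e ∈ l, pvC l e ≤ pvC l a) ∧ ∀ e ∈ l, pvC l e = pvC l a → a ≤ e

-- A's body as a function of the digit list
def pvAcore (l : List Int) : Int :=
  let st :=
    (PySem.List.pyRange 0 (PySem.List.len l - 1) 1).foldl
      (fun (st : PySem.Dict Int Int × Int) i =>
        if PySem.List.pyGetD l i 0 = PySem.List.pyGetD l (i + 1) 0 then
          (if st.1.contains (PySem.List.pyGetD l i 0) then
             st.1.insert (PySem.List.pyGetD l i 0) (st.1.getD (PySem.List.pyGetD l i 0) 0 + 1)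
           else st.1.insert (PySem.List.pyGetD l i 0) 1, 0)
        else st)
      (PySem.Dict.empty, 1)
  if st.2 = 1 then
    PySem.List.pyGetD (PySem.List.sorted l (fun x => x) false) 0 0
  else
    let h := PySem.List.sorted st.1.keys (fun x => x) false
    let newdi := h.foldl (fun (nd : PySem.Dict Int Int) k => nd.insert k (st.1.getD k 0)) PySem.Dict.empty
    let items := PySem.List.sorted newdi.items (fun p => p.2) true
    (PySem.List.pyGetD items 0 (0, 0)).1

-- B's body as a function of the digit list
def pvBcore (l : List Int) : Int :=
  (PySem.List.max? (PySem.List.sorted (PySem.Set.ofList l) (fun x => x) false) (pvC l)).getD 0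

lemma pvBest_unique {l : List Int} {a b : Int} (ha : pvBest l a) (hb : pvBest l b) : a = b := by
  obtain ⟨hma, hta, hea⟩ := ha
  obtain ⟨hmb, htb, heb⟩ := hb
  have h1 : pvC l a = pvC l b := le_antisymm (htb a hma) (hta b hmb)
  exact le_antisymm (hea b hmb h1.symm) (heb a hma h1)

lemma pvAbs_eq (n : Int) : (if n < 0 then -n else n) = |n| := by
  by_cases h : n < 0
  · simp [h, abs_of_neg h]
  · simp [h, abs_of_nonneg (le_of_not_gt h)]

lemma pvToDigitsCore_len_pos (f n : Nat) : 0 < (Nat.toDigitsCore 10 (f + 1) n []).length := by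
  simp only [Nat.toDigitsCore]
  split
  · simp
  · rw [Nat.toDigitsCore_lens_eq]
    omega

lemma pvToChars_ne_nil (n : Int) (h : 0 ≤ n) : PySem.Int.toChars n ≠ [] := by
  unfold PySem.Int.toChars
  rw [if_neg (by omega)]
  unfold Nat.toDigits
  exact List.ne_nil_of_length_pos (pvToDigitsCore_len_pos _ _)

-- index loop over range(len(l)-1) reading l[i], l[i+1] is a fold over zip(l, l[1:])
lemma pvFoldPairs {σ : Type} (l : List Int) (f : σ → Int → Int → σ) (init : σ) :
    (PySem.List.pyRange 0 (PySem.List.len l - 1) 1).foldl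
      (fun st i => f st (PySem.List.pyGetD l i 0) (PySem.List.pyGetD l (i + 1) 0)) init
    = (l.zip l.tail).foldl (fun st p => f st p.1 p.2) init := by
  cases l with
  | nil =>
    rw [PySem.List.pyRange_one_eq_nil (by simp [PySem.List.len])]
    simp
  | cons x t =>
    have hlen : (PySem.List.len (x :: t) - 1) = (PySem.List.len ((x :: t).zip (x :: t).tail)) := by
      simp [PySem.List.len]
    rw [hlen]
    rw [show (PySem.List.len ((x :: t).zip (x :: t).tail)) = (((x :: t).zip (x :: t).tail).length : Int) by simp [PySem.List.len]]
    rw [← PySem.List.foldl_pyRange_zero_pyGetD' ((x :: t).zip (x :: t).tail) (0, 0)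
      (fun st p => f st p.1 p.2) init]
    apply PySem.List.foldl_congr_mem
    intro st j hj
    rw [PySem.List.mem_pyRange_one] at hj
    obtain ⟨hj0, hj1⟩ := hj
    set P := (x :: t).zip (x :: t).tail with hP
    have hPl : P.length = t.length := by simp [hP]
    have hjP : j < (P.length : Int) := hj1
    have hjl : j < ((x :: t).length : Int) := by
      simp only [List.length_cons] at *
      omega
    have hjl1 : j + 1 < ((x :: t).length : Int) := by
      rw [hPl] at hjP
      simp only [List.length_cons]
      omega
    rw [PySem.List.pyGetD_eq_getElem _ 0 hj0 hjl,
        PySem.List.pyGetD_eq_getElem _ 0 (by omega) hjl1,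
        PySem.List.pyGetD_eq_getElem _ (0, 0) hj0 (by exact_mod_cast hjP)]
    have hk1 : (j + 1).toNat = j.toNat + 1 := by omega
    simp only [hP, List.getElem_zip, List.getElem_tail, hk1]

-- the pair/flag fold splits into a counting fold and a flag
lemma pvFoldPairState (F : List (Int × Int)) (d : PySem.Dict Int Int) (c : Int) :
    F.foldl (fun (st : PySem.Dict Int Int × Int) p => (st.1.insert p.1 (st.1.getD p.1 0 + 1), 0)) (d, c)
    = ((F.map (·.1)).foldl (fun d x => d.insert x (d.getD x 0 + 1)) d, if F = [] then c else 0) := by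
  induction F generalizing d c with
  | nil => simp
  | cons p F ih => simp [ih]

-- first-extremal characterisation of Python max on a list ordered by R
lemma pvFoldMaxInv {α : Type} (key : α → Int) (R : α → α → Prop) :
    ∀ (xs : List α) (m0 r : α), xs.Pairwise R → (∀ y ∈ xs, R m0 y) →
    xs.foldl
      (fun (acc : Option α) x =>
        match acc with
        | none => some x
        | some m => if key m < key x then some x else some m) (some m0) = some r →
    (r = m0 ∨ (r ∈ xs ∧ key m0 < key r)) ∧ (∀ y ∈ xs, key y ≤ key r) ∧
      (∀ y ∈ xs, key y = key r → y = r ∨ R r y) := by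
  intro xs
  induction xs with
  | nil =>
    intro m0 r _ _ h
    simp only [List.foldl_nil, Option.some.injEq] at h
    subst h
    exact ⟨Or.inl rfl, by simp, by simp⟩
  | cons x t ih =>
    intro m0 r hp hR h
    rw [List.pairwise_cons] at hp
    obtain ⟨hxt, hpt⟩ := hp
    simp only [List.foldl_cons] at h
    by_cases hlt : key m0 < key x
    · rw [if_pos hlt] at h
      obtain ⟨h1, h2, h3⟩ := ih x r hpt hxt h
      refine ⟨?_, ?_, ?_⟩
      · rcases h1 with h1 | ⟨h1a, h1b⟩
        · subst h1; exact Or.inr ⟨List.mem_cons_self, hlt⟩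
        · exact Or.inr ⟨List.mem_cons_of_mem _ h1a, lt_trans hlt h1b⟩
      · intro y hy
        rcases List.mem_cons.1 hy with hy | hy
        · subst hy
          rcases h1 with h1 | ⟨_, h1b⟩
          · subst h1; exact le_refl _
          · exact le_of_lt h1b
        · exact h2 y hy
      · intro y hy hk
        rcases List.mem_cons.1 hy with hy | hy
        · subst hy
          rcases h1 with h1 | ⟨_, h1b⟩
          · exact Or.inl h1.symm
          · omega
        · exact h3 y hy hk
    · rw [if_neg hlt] at h
      obtain ⟨h1, h2, h3⟩ := ih m0 r hpt (fun y hy => hR y (List.mem_cons_of_mem _ hy)) h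
      have hm0r : key m0 ≤ key r := by
        rcases h1 with h1 | ⟨_, h1b⟩
        · subst h1; exact le_refl _
        · exact le_of_lt h1b
      refine ⟨?_, ?_, ?_⟩
      · rcases h1 with h1 | ⟨h1a, h1b⟩
        · exact Or.inl h1
        · exact Or.inr ⟨List.mem_cons_of_mem _ h1a, h1b⟩
      · intro y hy
        rcases List.mem_cons.1 hy with hy | hy
        · subst hy; omega
        · exact h2 y hy
      · intro y hy hk
        rcases List.mem_cons.1 hy with hy | hy
        · subst hy
          rcases h1 with h1 | ⟨_, h1b⟩
          · rw [h1]; exact Or.inr (hR _ List.mem_cons_self)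
          · omega
        · exact h3 y hy hk

lemma pvMax?_spec {α : Type} (key : α → Int) (R : α → α → Prop) (xs : List α) (m : α)
    (hp : xs.Pairwise R) (h : PySem.List.max? xs key = some m) :
    m ∈ xs ∧ (∀ y ∈ xs, key y ≤ key m) ∧ (∀ y ∈ xs, key y = key m → y = m ∨ R m y) := by
  cases xs with
  | nil => simp [PySem.List.max?] at h
  | cons x t =>
    rw [List.pairwise_cons] at hp
    obtain ⟨hxt, hpt⟩ := hp
    simp only [PySem.List.max?, List.foldl_cons] at h
    obtain ⟨h1, h2, h3⟩ := pvFoldMaxInv key R t x m hpt hxt h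
    refine ⟨?_, ?_, ?_⟩
    · rcases h1 with h1 | ⟨h1a, _⟩
      · subst h1; exact List.mem_cons_self
      · exact List.mem_cons_of_mem _ h1a
    · intro y hy
      rcases List.mem_cons.1 hy with hy | hy
      · subst hy
        rcases h1 with h1 | ⟨_, h1b⟩
        · subst h1; exact le_refl _
        · exact le_of_lt h1b
      · exact h2 y hy
    · intro y hy hk
      rcases List.mem_cons.1 hy with hy | hy
      · subst hy
        rcases h1 with h1 | ⟨_, h1b⟩
        · exact Or.inl h1.symm
        · omega
      · exact h3 y hy hk

-- head of the stable reverse sort is Python's max (first extremal element)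
lemma pvHeadInsertBy {α κ : Type} [LT κ] [DecidableLT κ] (key : α → κ) (x : α) (acc : List α) :
    (PySem.List.insertBy (fun a b => decide (key b < key a)) x acc).head?
    = match acc.head? with
      | none => some x
      | some m => if key m < key x then some x else some m := by
  cases acc with
  | nil => simp [PySem.List.insertBy]
  | cons h t =>
    simp only [PySem.List.insertBy, List.head?_cons]
    by_cases hc : key h < key x <;> simp [hc]

lemma pvHeadSortedRevAux {α κ : Type} [LT κ] [DecidableLT κ] (key : α → κ) :
    ∀ (xs : List α) (acc : List α),
    (xs.foldl (fun acc x => PySem.List.insertBy (fun a b => decide (key b < key a)) x acc) acc).head?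
    = xs.foldl
        (fun (a : Option α) x =>
          match a with
          | none => some x
          | some m => if key m < key x then some x else some m) acc.head? := by
  intro xs
  induction xs with
  | nil => intro acc; simp
  | cons x t ih =>
    intro acc
    simp only [List.foldl_cons]
    rw [ih, pvHeadInsertBy]

lemma pvHeadSortedRev {α κ : Type} [LT κ] [DecidableLT κ] (xs : List α) (key : α → κ) :
    (PySem.List.sorted xs key true).head? = PySem.List.max? xs key := by
  rw [PySem.List.sorted_rev_eq_foldl_insertBy, pvHeadSortedRevAux, PySem.List.max?]
  rfl

-- the dict count of A equals pvC
lemma pvCountQ (l : List Int) (d : Int) :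
    ((((l.zip l.tail).filter (fun p => decide (p.1 = p.2))).map (·.1)).count d : Int) = pvC l d := by
  unfold pvC
  have h : ((((l.zip l.tail).filter (fun p => decide (p.1 = p.2))).map (fun p => p.1)).count d)
      = (l.zip l.tail).countP (fun p => decide (p.1 = p.2 ∧ p.2 = d)) := by
    rw [List.count_eq_countP, List.countP_map, List.countP_filter]
    apply List.countP_congr
    intro a _
    rcases a with ⟨a1, a2⟩
    by_cases h1 : a1 = a2 <;> by_cases h2 : a2 = d <;> subst_vars <;> simp [Function.comp] <;> simp_all
  exact_mod_cast h

-- the specialised instance of pvFoldPairs for A's loop body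
lemma pvFoldPairsA (l : List Int) :
    (PySem.List.pyRange 0 (PySem.List.len l - 1) 1).foldl
      (fun (st : PySem.Dict Int Int × Int) i =>
        if PySem.List.pyGetD l i 0 = PySem.List.pyGetD l (i + 1) 0 then
          (if st.1.contains (PySem.List.pyGetD l i 0) then
             st.1.insert (PySem.List.pyGetD l i 0) (st.1.getD (PySem.List.pyGetD l i 0) 0 + 1)
           else st.1.insert (PySem.List.pyGetD l i 0) 1, 0)
        else st)
      (PySem.Dict.empty, 1)
    = (l.zip l.tail).foldl
      (fun (st : PySem.Dict Int Int × Int) p =>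
        if p.1 = p.2 then
          (if st.1.contains p.1 then st.1.insert p.1 (st.1.getD p.1 0 + 1)
           else st.1.insert p.1 1, 0)
        else st)
      (PySem.Dict.empty, 1) :=
  pvFoldPairs l
    (fun (st : PySem.Dict Int Int × Int) (a b : Int) =>
      if a = b then
        (if st.1.contains a then st.1.insert a (st.1.getD a 0 + 1) else st.1.insert a 1, 0)
      else st)
    ((PySem.Dict.empty : PySem.Dict Int Int), (1 : Int))

-- contains-test plus insert is just the counting insert
lemma pvStepMerge :
    (fun (st : PySem.Dict Int Int × Int) (p : Int × Int) =>
       ((if st.1.contains p.1 then st.1.insert p.1 (st.1.getD p.1 0 + 1)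
         else st.1.insert p.1 1), (0 : Int)))
    = (fun (st : PySem.Dict Int Int × Int) p => (st.1.insert p.1 (st.1.getD p.1 0 + 1), 0)) := by
  funext st p
  by_cases hc : st.1.contains p.1 = true
  · simp [hc]
  · have hc' : st.1.contains p.1 = false := by simpa using hc
    rw [if_neg (by simp [hc']), PySem.Dict.getD_of_not_contains _ _ hc']
    norm_num

-- A's loop state: the dict is Counter(Q), the flag records whether any pair matched
lemma pvStA (l : List Int) :
    (PySem.List.pyRange 0 (PySem.List.len l - 1) 1).foldl
      (fun (st : PySem.Dict Int Int × Int) i =>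
        if PySem.List.pyGetD l i 0 = PySem.List.pyGetD l (i + 1) 0 then
          (if st.1.contains (PySem.List.pyGetD l i 0) then
             st.1.insert (PySem.List.pyGetD l i 0) (st.1.getD (PySem.List.pyGetD l i 0) 0 + 1)
           else st.1.insert (PySem.List.pyGetD l i 0) 1, 0)
        else st)
      (PySem.Dict.empty, 1)
    = (PySem.Dict.counter (((l.zip l.tail).filter (fun p => decide (p.1 = p.2))).map (·.1)),
       if ((l.zip l.tail).filter (fun p => decide (p.1 = p.2))) = [] then 1 else 0) := by
  refine (pvFoldPairsA l).trans (Eq.trans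
    (PySem.List.foldl_ite_eq_foldl_filter (fun p : Int × Int => p.1 = p.2)
      (fun (st : PySem.Dict Int Int × Int) (p : Int × Int) =>
        ((if st.1.contains p.1 then st.1.insert p.1 (st.1.getD p.1 0 + 1)
          else st.1.insert p.1 1), (0 : Int)))
      (l.zip l.tail) (PySem.Dict.empty, 1)) ?_)
  rw [pvStepMerge, pvFoldPairState, PySem.Dict.foldl_insert_getD_add_one_eq_counter]

lemma pvQ_sub (l : List Int) {q : Int}
    (hq : q ∈ ((l.zip l.tail).filter (fun p => decide (p.1 = p.2))).map (·.1)) : q ∈ l := by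
  obtain ⟨p, hp, rfl⟩ := List.mem_map.1 hq
  exact (List.of_mem_zip (List.mem_filter.1 hp).1).1

-- ===== A's core satisfies pvBest =====
lemma pvAcore_best (l : List Int) (hl : l ≠ []) : pvBest l (pvAcore l) := by
  unfold pvAcore
  rw [pvStA]
  dsimp only
  by_cases hF : ((l.zip l.tail).filter (fun p => decide (p.1 = p.2))) = []
  · rw [hF, if_pos (rfl : ([] : List (Int × Int)) = []), if_pos (rfl : (1 : Int) = 1)]
    obtain ⟨y, t, hsort⟩ : ∃ y t, PySem.List.sorted l (fun x => x) false = y :: t := by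
      cases hs : PySem.List.sorted l (fun x => x) false with
      | nil => exact absurd ((PySem.List.sorted_eq_nil_iff _ _ _).1 hs) hl
      | cons y t => exact ⟨y, t, rfl⟩
    rw [hsort, PySem.List.pyGetD_zero_cons]
    have hzero : ∀ e : Int, pvC l e = 0 := by
      intro e
      have h0 : (l.zip l.tail).countP (fun p => decide (p.1 = p.2 ∧ p.2 = e)) = 0 := by
        refine List.countP_eq_zero.2 ?_
        rintro ⟨a, b⟩ hab
        have hnp := List.filter_eq_nil_iff.1 hF ⟨a, b⟩ hab
        simp only [decide_eq_true_eq] at hnp ⊢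
        exact fun hcon => hnp hcon.1
      unfold pvC
      exact_mod_cast h0
    refine ⟨(PySem.List.mem_sorted _ _ _ _).1 (hsort ▸ List.mem_cons_self), ?_, ?_⟩
    · intro e _; rw [hzero e, hzero y]
    · intro e he _
      exact PySem.List.key_head_sorted_le l (fun x => x) hsort e he
  · rw [if_neg hF, if_neg (by norm_num : ¬((0 : Int) = 1))]
    set Q := ((l.zip l.tail).filter (fun p => decide (p.1 = p.2))).map (·.1) with hQdef
    have hCQ : ∀ d, ((Q.count d : Int)) = pvC l d := fun d => pvCountQ l d
    have hQne : Q ≠ [] := by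
      rw [hQdef]
      exact fun h => hF (List.map_eq_nil_iff.1 h)
    rw [PySem.Dict.keys_counter]
    set K := PySem.List.sorted (PySem.Set.ofList Q) (fun x => x) false with hKdef
    have hKQ : ∀ k, k ∈ K ↔ k ∈ Q := by
      intro k
      rw [hKdef, PySem.List.mem_sorted, PySem.Set.mem_ofList]
    have hKnodup : K.Nodup :=
      ((PySem.List.sorted_perm _ _ _).nodup_iff).2 (PySem.Set.nodup_ofList Q)
    have hitems : (K.foldl (fun (nd : PySem.Dict Int Int) k =>
        nd.insert k ((PySem.Dict.counter Q).getD k 0)) PySem.Dict.empty).items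
        = [] ++ K.map (fun k => (k, (PySem.Dict.counter Q).getD k 0)) :=
      PySem.Dict.items_foldl_insert_fresh K (fun a => a)
        (fun k => (PySem.Dict.counter Q).getD k 0) PySem.Dict.empty
        (fun a _ => PySem.Dict.contains_empty a) (by simpa using hKnodup)
    rw [hitems, List.nil_append]
    have hmapc : K.map (fun k => (k, (PySem.Dict.counter Q).getD k 0))
        = K.map (fun k => (k, pvC l k)) :=
      List.map_congr_left (fun k _ => by rw [PySem.Dict.getD_counter, hCQ])
    rw [hmapc]
    set P2 := K.map (fun k => (k, pvC l k)) with hP2def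
    have hKne : K ≠ [] := by
      rw [hKdef, Ne, PySem.List.sorted_eq_nil_iff]
      intro hembed
      obtain ⟨q, hq⟩ := List.exists_mem_of_ne_nil Q hQne
      exact absurd ((PySem.Set.mem_ofList Q q).2 hq) (by simp [hembed])
    have hP2ne : P2 ≠ [] := by
      rw [hP2def, Ne, List.map_eq_nil_iff]
      exact hKne
    obtain ⟨m', rest, hitems2⟩ : ∃ m' rest,
        PySem.List.sorted P2 (fun p => p.2) true = m' :: rest := by
      cases hs : PySem.List.sorted P2 (fun p => p.2) true with
      | nil => exact absurd ((PySem.List.sorted_eq_nil_iff _ _ _).1 hs) hP2ne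
      | cons y t => exact ⟨y, t, rfl⟩
    rw [hitems2, PySem.List.pyGetD_zero_cons]
    have hmax : PySem.List.max? P2 (fun p => p.2) = some m' := by
      rw [← pvHeadSortedRev, hitems2]
      rfl
    have hpw : P2.Pairwise (fun p q => p.1 < q.1) := by
      rw [hP2def, List.pairwise_map]
      exact PySem.List.sorted_ofList_pairwise_lt Q
    obtain ⟨hmem, hmaxle, hties⟩ :=
      pvMax?_spec (fun p : Int × Int => p.2) (fun p q => p.1 < q.1) P2 m' hpw hmax
    obtain ⟨k, hkK, hkm⟩ := List.mem_map.1 (hP2def ▸ hmem)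
    have hkQ : k ∈ Q := (hKQ k).1 hkK
    have hkl : k ∈ l := pvQ_sub l hkQ
    have hm1 : m'.1 = k := by rw [← hkm]
    have hm2 : m'.2 = pvC l k := by rw [← hkm]
    have hCnonneg : ∀ e : Int, 0 ≤ pvC l e := by
      intro e; unfold pvC; exact Int.natCast_nonneg _
    have hmemC : ∀ e : Int, e ∈ Q ↔ 0 < pvC l e := by
      intro e
      rw [← hCQ e, Int.natCast_pos]
      exact List.count_pos_iff.symm
    have hboundQ : ∀ e ∈ Q, pvC l e ≤ pvC l k := by
      intro e heQ
      have hmemP2 : (e, pvC l e) ∈ P2 := by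
        rw [hP2def]
        exact List.mem_map.2 ⟨e, (hKQ e).2 heQ, rfl⟩
      have h := hmaxle _ hmemP2
      rw [hm2] at h
      exact h
    refine ⟨hm1 ▸ hkl, ?_, ?_⟩
    · intro e hel
      rw [hm1]
      by_cases heQ : e ∈ Q
      · exact hboundQ e heQ
      · have h0 : pvC l e = 0 := by
          rcases lt_or_eq_of_le (hCnonneg e) with h | h
          · exact absurd ((hmemC e).2 h) heQ
          · exact h.symm
        rw [h0]
        exact hCnonneg k
    · intro e hel heq
      rw [hm1] at heq ⊢
      have hkpos : 0 < pvC l k := (hmemC k).1 hkQ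
      have heQ : e ∈ Q := (hmemC e).2 (heq ▸ hkpos)
      have hmemP2 : (e, pvC l e) ∈ P2 := by
        rw [hP2def]
        exact List.mem_map.2 ⟨e, (hKQ e).2 heQ, rfl⟩
      rcases hties _ hmemP2 (by rw [hm2]; exact heq) with h | h
      · have he2 : e = m'.1 := by rw [← h]
        rw [he2, hm1]
      · rw [hm1] at h
        exact le_of_lt h

-- ===== B's core satisfies pvBest =====
lemma pvBcore_best (l : List Int) (hl : l ≠ []) : pvBest l (pvBcore l) := by
  unfold pvBcore
  set S := PySem.List.sorted (PySem.Set.ofList l) (fun x => x) false with hSdef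
  have hSl : ∀ e, e ∈ S ↔ e ∈ l := by
    intro e
    rw [hSdef, PySem.List.mem_sorted, PySem.Set.mem_ofList]
  have hSne : S ≠ [] := by
    rw [hSdef, Ne, PySem.List.sorted_eq_nil_iff]
    intro hembed
    obtain ⟨x, hx⟩ := List.exists_mem_of_ne_nil l hl
    exact absurd ((PySem.Set.mem_ofList l x).2 hx) (by simp [hembed])
  cases hmax : PySem.List.max? S (pvC l) with
  | none => exact absurd ((PySem.List.max?_eq_none_iff _ _).1 hmax) hSne
  | some m =>
    simp only [Option.getD_some]
    have hpw : S.Pairwise (fun a b => a < b) := by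
      rw [hSdef]
      exact PySem.List.sorted_ofList_pairwise_lt l
    obtain ⟨hmem, hle, hties⟩ := pvMax?_spec (pvC l) (fun a b => a < b) S m hpw hmax
    refine ⟨(hSl m).1 hmem, ?_, ?_⟩
    · intro e hel
      exact hle e ((hSl e).2 hel)
    · intro e hel heq
      rcases hties e ((hSl e).2 hel) heq with h | h
      · rw [h]
      · exact le_of_lt h

lemma pvA_eq (n : Int) :
    longestdigitrun n = pvAcore ((PySem.Int.toChars |n|).map pvDigitVal) := by
  unfold longestdigitrun pvAcore
  rw [pvAbs_eq]

lemma pvB_eq (n : Int) :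
    longestdigitrun_alt n = pvBcore ((PySem.Int.toChars |n|).map pvDigitVal) := by
  simp only [longestdigitrun_alt, pvBcore]
  congr 1
  refine congrArg _ ?_
  funext d
  rw [PySem.List.slice_from_one]
  unfold pvC
  have h := PySem.List.foldl_ite_add_one
    (fun p : Int × Int => p.1 = p.2 ∧ p.2 = d)
    (((PySem.Int.toChars |n|).map pvDigitVal).zip ((PySem.Int.toChars |n|).map pvDigitVal).tail) 0
  simpa using h

-- ===== VERDICT (by name: the statement is the Claim_ definition above) =====
theorem longestdigitrun_spec : Claim_equal_longestdigitrun := by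
  intro n _
  unfold Spec_longestdigitrun
  rw [pvA_eq, pvB_eq]
  have hl : ((PySem.Int.toChars |n|).map pvDigitVal) ≠ [] := by
    intro h
    exact pvToChars_ne_nil |n| (abs_nonneg n) (List.map_eq_nil_iff.1 h)
  exact pvBest_unique (pvAcore_best _ hl) (pvBcore_best _ hl)
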